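-- pv_equiv track=rewrite | github.com/bhausinger/bifrost | apps/scraper/src/services/email_utils.py | is_junk_email
-- ===== SOURCE A (Python) =====
-- JUNK_EMAIL_PATTERNS = {
--     "support@", "info@beatport", "help@", "noreply@", "no-reply@",
--     "admin@", "contact@beatport", "support@beatport", "legal@",
--     "privacy@", "abuse@", "postmaster@", "webmaster@",
--     "guidelines@", "rules@", "feedback@", "press@beatport",
--     "community@", "team@patreon", "support@patreon",
--     "hello@bandcamp", "support@bandcamp", "support@spotify",
--     "support@soundcloud", "copyright@", "dmca@", "takedown@",
-- }
--
-- JUNK_EMAIL_DOMAINS = {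
--     "beatport.com", "patreon.com", "bandcamp.com", "spotify.com",
--     "soundcloud.com", "youtube.com", "facebook.com", "twitter.com",
--     "instagram.com", "tiktok.com", "discord.com", "twitch.tv",
--     "apple.com", "google.com", "amazon.com", "sentry.io",
--     "example.com", "test.com", "localhost",
-- }
--
-- def is_junk_email(email: str) -> bool:
--     """Check if an email is a known junk/platform support address."""
--     lower = email.lower()
--     domain = lower.split("@")[1] if "@" in lower else ""
--     # Exact domain match
--     if domain in JUNK_EMAIL_DOMAINS:
--         return True
--     # Subdomain match (e.g. jamiegos.bandcamp.com)
--     for junk_domain in JUNK_EMAIL_DOMAINS: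
--         if domain.endswith("." + junk_domain):
--             return True
--     # Pattern match
--     return any(pattern in lower for pattern in JUNK_EMAIL_PATTERNS)
-- ===== SOURCE B (Python) =====
-- JUNK_EMAIL_PATTERNS = set(
--     "support@ info@beatport help@ noreply@ no-reply@ admin@ contact@beatport "
--     "support@beatport legal@ privacy@ abuse@ postmaster@ webmaster@ guidelines@ "
--     "rules@ feedback@ press@beatport community@ team@patreon support@patreon "
--     "hello@bandcamp support@bandcamp support@spotify support@soundcloud "
--     "copyright@ dmca@ takedown@".split()
-- )
--
-- JUNK_EMAIL_DOMAINS = set(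
--     "beatport.com patreon.com bandcamp.com spotify.com soundcloud.com "
--     "youtube.com facebook.com twitter.com instagram.com tiktok.com "
--     "discord.com twitch.tv apple.com google.com amazon.com sentry.io "
--     "example.com test.com localhost".split()
-- )
--
--
-- def _suffix_hit(s):
--     """Recursively test s and each of its dot-boundary suffixes for membership."""
--     if s in JUNK_EMAIL_DOMAINS:
--         return True
--     dot = s.find(".")
--     return dot != -1 and _suffix_hit(s[dot + 1:])
--
--
-- def _pattern_hit(lower):
--     for pattern in JUNK_EMAIL_PATTERNS:
--         if pattern in lower:
--             return True
--     return False
--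
--
-- def is_junk_email(email: str) -> bool:
--     """Check if an email is a known junk/platform support address."""
--     lower = email.lower()
--     domain = lower.split("@")[1] if "@" in lower else ""
--     return _suffix_hit(domain) or _pattern_hit(lower)
-- ===== Notes on version B (the rewrite author's own statement) =====
-- stated objective: alternative
-- what changed: Instead of an exact-domain set lookup plus an endswith scan over all 19 junk domains, B recursively walks the domain's own dot-boundary suffixes (find the first dot, recurse past it) doing one set lookup per label, scans patterns with an explicit early-return loop, and builds both constant sets by whitespace-splitting one space-separated string literal.
import Mathlib
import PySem

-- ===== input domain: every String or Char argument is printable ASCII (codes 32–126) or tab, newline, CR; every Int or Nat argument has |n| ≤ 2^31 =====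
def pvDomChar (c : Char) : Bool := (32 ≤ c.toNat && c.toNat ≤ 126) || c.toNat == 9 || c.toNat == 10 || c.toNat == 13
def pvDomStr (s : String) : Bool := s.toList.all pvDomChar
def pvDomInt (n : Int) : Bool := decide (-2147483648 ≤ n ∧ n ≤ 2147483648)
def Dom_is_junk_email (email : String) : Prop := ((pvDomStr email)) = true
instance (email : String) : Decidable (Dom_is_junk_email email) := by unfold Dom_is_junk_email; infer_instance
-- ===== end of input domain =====

-- B replaces A's exact-domain lookup plus endswith scan over the whole junk-domain set by a
-- recursive walk over the domain's dot-boundary suffixes with one set lookup each, builds the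
-- constant sets by splitting a single space-separated string, and scans patterns with an
-- explicit early-return loop (alternative decomposition, not claimed faster).

-- ===== PORT A =====
-- Python module-level set constants, ported on List Char (PySem.Set = distinct-element list).
def junkPatternsL : PySem.Set (List Char) := PySem.Set.ofList
  ["support@".toList, "info@beatport".toList, "help@".toList, "noreply@".toList, "no-reply@".toList,
   "admin@".toList, "contact@beatport".toList, "support@beatport".toList, "legal@".toList,
   "privacy@".toList, "abuse@".toList, "postmaster@".toList, "webmaster@".toList,
   "guidelines@".toList, "rules@".toList, "feedback@".toList, "press@beatport".toList,
   "community@".toList, "team@patreon".toList, "support@patreon".toList,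
   "hello@bandcamp".toList, "support@bandcamp".toList, "support@spotify".toList,
   "support@soundcloud".toList, "copyright@".toList, "dmca@".toList, "takedown@".toList]

def junkDomainsL : PySem.Set (List Char) := PySem.Set.ofList
  ["beatport.com".toList, "patreon.com".toList, "bandcamp.com".toList, "spotify.com".toList,
   "soundcloud.com".toList, "youtube.com".toList, "facebook.com".toList, "twitter.com".toList,
   "instagram.com".toList, "tiktok.com".toList, "discord.com".toList, "twitch.tv".toList,
   "apple.com".toList, "google.com".toList, "amazon.com".toList, "sentry.io".toList,
   "example.com".toList, "test.com".toList, "localhost".toList]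

def is_junk_email (email : String) : Bool :=
  let lower := PySem.Chars.lower email.toList
  let domain := if PySem.Chars.isIn ['@'] lower then
      PySem.List.pyGetD (PySem.Chars.splitOn lower ['@']) 1 [] else []
  if PySem.Set.contains junkDomainsL domain then true
  else if List.any junkDomainsL (fun junk_domain => PySem.Chars.endswith domain ('.' :: junk_domain)) then true
  else List.any junkPatternsL (fun pattern => PySem.Chars.isIn pattern lower)

-- ===== PORT B =====
-- Source B builds each constant set by whitespace-splitting one space-separated string literal.
def junkPatternsB : PySem.Set (List Char) := PySem.Set.ofList (PySem.Chars.split₀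
  ("support@ info@beatport help@ noreply@ no-reply@ admin@ contact@beatport support@beatport legal@ privacy@ abuse@ postmaster@ webmaster@ guidelines@ rules@ feedback@ press@beatport community@ team@patreon support@patreon hello@bandcamp support@bandcamp support@spotify support@soundcloud copyright@ dmca@ takedown@".toList))

def junkDomainsB : PySem.Set (List Char) := PySem.Set.ofList (PySem.Chars.split₀
  ("beatport.com patreon.com bandcamp.com spotify.com soundcloud.com youtube.com facebook.com twitter.com instagram.com tiktok.com discord.com twitch.tv apple.com google.com amazon.com sentry.io example.com test.com localhost".toList))

-- termination fact the port cites: slicing past a found dot shortens the string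
lemma pv_slice_after_dot_length_lt (s : List Char) (h : ¬ PySem.Chars.find s ['.'] = -1) :
    (PySem.List.slice s (some (PySem.Chars.find s ['.'] + 1)) none).length < s.length := by
  have h0 : 0 ≤ PySem.Chars.find s ['.'] := by
    have := PySem.Chars.neg_one_le_find s ['.']
    omega
  have hinf : ['.'] <:+: s := (PySem.Chars.find_nonneg_iff s ['.']).mp h0
  have hlen : 1 ≤ s.length := by
    have := hinf.sublist.length_le
    simpa using this
  rw [PySem.List.slice_from s (by omega)]
  rw [List.length_drop]
  omega

-- Source B's _suffix_hit: test s, then recurse past the first dot (dot = s.find("."); s[dot+1:])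
def suffixHit (s : List Char) : Bool :=
  if PySem.Set.contains junkDomainsB s then true
  else if h : PySem.Chars.find s ['.'] = -1 then false
  else suffixHit (PySem.List.slice s (some (PySem.Chars.find s ['.'] + 1)) none)
termination_by s.length
decreasing_by exact pv_slice_after_dot_length_lt s h

-- Source B's _pattern_hit: for-loop with early return over the pattern set
def patternHit : List (List Char) → List Char → Bool
  | [], _ => false
  | pattern :: rest, lower =>
    if PySem.Chars.isIn pattern lower then true else patternHit rest lower

def is_junk_email_alt (email : String) : Bool :=
  let lower := PySem.Chars.lower email.toList
  let domain := if PySem.Chars.isIn ['@'] lower then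
      PySem.List.pyGetD (PySem.Chars.splitOn lower ['@']) 1 [] else []
  suffixHit domain || patternHit junkPatternsB lower

-- ===== PRECONDITION & SPEC =====
def Spec_is_junk_email (email : String) (out : Bool) : Prop := out = is_junk_email_alt email
instance (email : String) (out : Bool) : Decidable (Spec_is_junk_email email out) := by unfold Spec_is_junk_email; infer_instance

-- ===== CLAIM (what is proved, stated in full; the proofs are below) =====
def Claim_equal_is_junk_email : Prop := ∀ (email : String), Dom_is_junk_email email → Spec_is_junk_email email (is_junk_email email)

-- ===== LEMMAS AND PROOFS =====

-- the two initialization styles build the same sets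
set_option maxRecDepth 40000 in
lemma pv_domains_eq : junkDomainsB = junkDomainsL := by decide
set_option maxRecDepth 40000 in
lemma pv_patterns_eq : junkPatternsB = junkPatternsL := by decide

-- splitting a dot-headed suffix of a ++ '.'::r when a is dot-free
lemma pv_suffix_split {a r d : List Char} (ha : ('.' : Char) ∉ a) :
    (('.' :: d) <:+ (a ++ '.' :: r)) ↔ d = r ∨ ('.' :: d) <:+ r := by
  constructor
  · intro h
    rcases lt_trichotomy d.length r.length with hlt | heq | hgt
    · right
      have hsr : ('.' :: r) <:+ (a ++ '.' :: r) := List.suffix_append a ('.' :: r)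
      have hnest := List.suffix_of_suffix_length_le h hsr (by simp; omega)
      obtain ⟨v, hv⟩ := hnest
      cases v with
      | nil =>
        simp only [List.nil_append, List.cons.injEq] at hv
        have := congrArg List.length hv.2
        omega
      | cons c t =>
        obtain ⟨hc1, hc2⟩ := List.cons_eq_cons.mp hv
        subst hc1
        exact ⟨t, hc2⟩
    · left
      obtain ⟨u, hu⟩ := h
      have hul : u.length = a.length := by
        have := congrArg List.length hu
        simp at this
        omega
      have hinj := List.append_inj hu hul
      exact (List.cons_eq_cons.mp hinj.2).2
    · exfalso
      apply ha
      obtain ⟨u, hu⟩ := h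
      have hul : u.length < a.length := by
        have := congrArg List.length hu
        simp at this
        omega
      have h1 : (u ++ ['.']) <+: (a ++ '.' :: r) := by
        rw [← hu]
        exact ⟨d, by simp⟩
      have h2 : (u ++ ['.']) <+: a :=
        List.prefix_of_prefix_length_le h1 (a.prefix_append ('.' :: r)) (by simp; omega)
      exact h2.subset (by simp)
  · rintro (rfl | h)
    · exact List.suffix_append a _
    · exact h.trans ((List.suffix_cons '.' r).trans (List.suffix_append a ('.' :: r)))

-- decomposition of s at the first dot found by find: s = (dot-free prefix) ++ '.' :: s[dot+1:]
lemma pv_find_dot_decomp (s : List Char) (h : ¬ PySem.Chars.find s ['.'] = -1) :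
    ∃ a : List Char, ('.' : Char) ∉ a ∧
      s = a ++ '.' :: (PySem.List.slice s (some (PySem.Chars.find s ['.'] + 1)) none) := by
  have h0 : 0 ≤ PySem.Chars.find s ['.'] := by
    have := PySem.Chars.neg_one_le_find s ['.']
    omega
  obtain ⟨hpre, hmin⟩ := PySem.Chars.find_spec h0
  have hn : (PySem.Chars.find s ['.']).toNat ≤ s.length := by
    have := PySem.Chars.find_le_length s ['.']
    omega
  refine ⟨s.take (PySem.Chars.find s ['.']).toNat, ?_, ?_⟩
  · intro hmem
    obtain ⟨i, hi, hgi⟩ := List.mem_iff_getElem.mp hmem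
    have hilen : i < s.length := by
      have := List.length_take_le (PySem.Chars.find s ['.']).toNat s
      omega
    have hifind : i < (PySem.Chars.find s ['.']).toNat := by
      have := hi
      simp [List.length_take] at this
      omega
    apply hmin i hifind
    rw [List.drop_eq_getElem_cons hilen]
    refine ⟨s.drop (i + 1), ?_⟩
    have : s[i] = '.' := by rw [← List.getElem_take (h := hi)]; exact hgi
    simp [this]
  · rw [PySem.List.slice_from s (by omega)]
    have h1 : (PySem.Chars.find s ['.'] + 1).toNat = (PySem.Chars.find s ['.']).toNat + 1 := by omega
    rw [h1]
    obtain ⟨t, ht⟩ := hpre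
    have hdropn : s.drop (PySem.Chars.find s ['.']).toNat = '.' :: t := by
      rw [← ht]; rfl
    have htt : t = s.drop ((PySem.Chars.find s ['.']).toNat + 1) := by
      rw [← List.tail_drop, hdropn]
      rfl
    conv_lhs => rw [← List.take_append_drop (PySem.Chars.find s ['.']).toNat s]
    rw [hdropn, htt]

-- B's recursive suffix walk computes exactly A's (exact match ∨ endswith over the set) disjunction
lemma pv_suffixHit_eq (s : List Char) :
    suffixHit s = (PySem.Set.contains junkDomainsL s ||
      List.any junkDomainsL (fun d => PySem.Chars.endswith s ('.' :: d))) := by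
  fun_induction suffixHit s with
  | case1 s hc =>
    rw [pv_domains_eq] at hc
    simp only [PySem.Set.contains] at hc ⊢; rw [hc, Bool.true_or]
  | case2 s hc hfind =>
    rw [pv_domains_eq] at hc
    have hany : List.any junkDomainsL (fun d => PySem.Chars.endswith s ('.' :: d)) = false := by
      rw [List.any_eq_false]
      intro d _ hend
      have hsuf := (PySem.Chars.endswith_iff s ('.' :: d)).mp hend
      have hdot : ('.' : Char) ∈ s := hsuf.sublist.subset (List.mem_cons_self)
      have hin : ['.'] <:+: s := (List.singleton_infix_iff '.' s).mpr hdot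
      exact ((PySem.Chars.find_eq_neg_one_iff s ['.']).mp hfind) hin
    simp only [PySem.Set.contains] at hc ⊢
    rw [Bool.not_eq_true] at hc
    rw [hc, hany]
    rfl
  | case3 s hc hfind ih =>
    rw [pv_domains_eq] at hc
    obtain ⟨a, ha, hs⟩ := pv_find_dot_decomp s hfind
    set r := PySem.List.slice s (some (PySem.Chars.find s ['.'] + 1)) none with hr
    rw [ih]
    rw [Bool.eq_iff_iff]
    simp only [Bool.or_eq_true, List.any_eq_true, PySem.Chars.endswith_iff,
      PySem.Set.contains, List.contains_iff_mem]
    have hcf : s ∉ junkDomainsL := by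
      simpa [PySem.Set.contains, List.contains_iff_mem] using hc
    constructor
    · rintro (hmem | ⟨d, hd, hsuf⟩)
      · refine Or.inr ⟨r, hmem, ?_⟩
        rw [hs]
        exact List.suffix_append a _
      · refine Or.inr ⟨d, hd, ?_⟩
        rw [hs]
        exact (pv_suffix_split ha).mpr (Or.inr hsuf)
    · rintro (hmem | ⟨d, hd, hsuf⟩)
      · exact absurd hmem hcf
      · rw [hs] at hsuf
        rcases (pv_suffix_split ha).mp hsuf with rfl | hsr
        · exact Or.inl hd
        · exact Or.inr ⟨d, hd, hsr⟩

-- B's early-return pattern loop is A's any-over-the-set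
lemma pv_patternHit_eq (ps : List (List Char)) (lower : List Char) :
    patternHit ps lower = List.any ps (fun pattern => PySem.Chars.isIn pattern lower) := by
  induction ps with
  | nil => rfl
  | cons p rest ih =>
    simp only [patternHit, List.any_cons, ih]
    by_cases h : PySem.Chars.isIn p lower = true
    · rw [if_pos h, h, Bool.true_or]
    · rw [if_neg h, Bool.not_eq_true] at *
      rw [h, Bool.false_or]

-- A's if/else-if chain as the corresponding boolean disjunction
lemma pv_if_or (c a p : Bool) :
    (if c = true then true else if a = true then true else p) = ((c || a) || p) := by
  cases c <;> cases a <;> simp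

-- ===== VERDICT (by name: the statement is the Claim_ definition above) =====
theorem is_junk_email_spec : Claim_equal_is_junk_email := by
  intro email _
  unfold Spec_is_junk_email
  simp only [is_junk_email, is_junk_email_alt, pv_suffixHit_eq, pv_patternHit_eq,
    pv_patterns_eq, pv_if_or]
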